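-- pv_equiv track=rewrite | github.com/Liziloo/wikitree-data-parser | backend/parsers/original_parser.py | strip_aliases_from_chunks
-- ===== SOURCE A (Python) =====
-- ALIAS_MARKERS = {"alias", "aka", "a.k.a.", "a.k.a"}
--
-- def is_all_caps_word(token: str) -> bool:
--     if not token:
--         return False
--     has_alpha = any(c.isalpha() for c in token)
--     return has_alpha and token == token.upper()
--
-- def strip_aliases_from_chunks(chunks):
--     cleaned_chunks = []
--     alias_names = []
--
--     for chunk in chunks:
--         tokens = chunk.split()
--         new_tokens = []
--         i = 0
--         while i < len(tokens):
--             tok = tokens[i]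
--             if tok.lower() in ALIAS_MARKERS:
--                 i += 1
--                 alias_tokens = []
--                 while i < len(tokens) and is_all_caps_word(tokens[i]):
--                     alias_tokens.append(tokens[i])
--                     i += 1
--                 if alias_tokens:
--                     alias_names.append(" ".join(alias_tokens))
--                 continue
--             new_tokens.append(tok)
--             i += 1
--         cleaned_chunks.append(" ".join(new_tokens).strip())
--
--     return cleaned_chunks, alias_names
-- ===== SOURCE B (Python) =====
-- ALIAS_MARKERS = {"alias", "aka", "a.k.a.", "a.k.a"}
--
-- def is_all_caps_word(token):
--     if not token:
--         return False
--     has_alpha = any(c.isalpha() for c in token)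
--     return has_alpha and token == token.upper()
--
-- def strip_aliases_from_chunks(chunks):
--     cleaned_chunks = []
--     alias_names = []
--     for chunk in chunks:
--         new_tokens = []
--         collecting = False
--         buf = []
--         for tok in chunk.split():
--             if collecting and is_all_caps_word(tok):
--                 buf.append(tok)
--                 continue
--             if collecting:
--                 if buf:
--                     alias_names.append(" ".join(buf))
--                 collecting = False
--             if tok.lower() in ALIAS_MARKERS:
--                 collecting = True
--                 buf = []
--             else:
--                 new_tokens.append(tok)
--         if collecting and buf:
--             alias_names.append(" ".join(buf))
--         cleaned_chunks.append(" ".join(new_tokens).strip())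
--     return cleaned_chunks, alias_names
-- ===== Notes on version B (the rewrite author's own statement) =====
-- stated objective: alternative
-- what changed: Replaced the index-based while loop with an inner index-advancing alias-collection loop by a single pass over the tokens that maintains a 'collecting' flag and an alias buffer, flushed when a non-all-caps token or the end of the chunk is reached.
import Mathlib
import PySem

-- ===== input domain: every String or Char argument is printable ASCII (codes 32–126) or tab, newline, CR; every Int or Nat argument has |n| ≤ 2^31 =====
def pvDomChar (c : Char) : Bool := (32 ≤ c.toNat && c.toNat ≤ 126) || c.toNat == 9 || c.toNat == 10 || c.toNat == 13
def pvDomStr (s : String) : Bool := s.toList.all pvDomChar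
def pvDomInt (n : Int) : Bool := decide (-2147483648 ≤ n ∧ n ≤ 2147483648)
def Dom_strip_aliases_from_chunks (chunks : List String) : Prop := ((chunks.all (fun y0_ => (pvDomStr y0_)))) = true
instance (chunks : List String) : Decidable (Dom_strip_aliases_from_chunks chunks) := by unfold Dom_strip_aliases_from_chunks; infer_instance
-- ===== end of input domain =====

-- B replaces A's nested index-advancing while loops by a single pass with a 'collecting' flag and alias buffer (alternative decomposition, same cost).

-- ===== PORT A =====

def ALIAS_MARKERS : PySem.Set String := PySem.Set.ofList ["alias", "aka", "a.k.a.", "a.k.a"]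

def is_all_caps_word (token : String) : Bool :=
  if token = "" then false
  else
    let has_alpha := token.toList.any PySem.Chars.isalpha
    has_alpha && (token == PySem.Str.upper token)

-- inner 'while i < len(tokens) and is_all_caps_word(tokens[i])' run: (collected run, remaining tokens)
def collectA : List String → List String × List String
  | [] => ([], [])
  | t :: ts =>
    if is_all_caps_word t then (t :: (collectA ts).1, (collectA ts).2)
    else ([], t :: ts)

-- needed by loopA's termination proof
theorem collectA_snd_length (ts : List String) : (collectA ts).2.length ≤ ts.length := by
  induction ts with
  | nil => simp [collectA]
  | cons t ts ih =>
    simp only [collectA]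
    split
    · simpa using Nat.le_succ_of_le ih
    · simp

-- the outer 'while i < len(tokens)' loop of A, over the remaining tokens
def loopA : List String → List String → List String → List String × List String
  | [], newToks, aliases => (newToks, aliases)
  | t :: ts, newToks, aliases =>
    if PySem.Set.contains ALIAS_MARKERS (PySem.Str.lower t) then
      loopA (collectA ts).2 newToks
        (if (collectA ts).1 ≠ [] then aliases ++ [PySem.Str.join " " (collectA ts).1] else aliases)
    else
      loopA ts (newToks ++ [t]) aliases
termination_by ts _ _ => ts.length
decreasing_by
  · have := collectA_snd_length ts; simp; omega
  · simp

def outerA : List String → List String → List String → List String × List String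
  | [], cleaned, aliases => (cleaned, aliases)
  | c :: cs, cleaned, aliases =>
    let p := loopA (PySem.Str.split₀ c) [] aliases
    outerA cs (cleaned ++ [PySem.Str.strip (PySem.Str.join " " p.1)]) p.2

def strip_aliases_from_chunks (chunks : List String) : List String × List String :=
  outerA chunks [] []

-- ===== PORT B =====

-- single pass with 'collecting' flag and alias buffer
def loopB : List String → Bool → List String → List String → List String → List String × List String
  | [], collecting, buf, newToks, aliases =>
    (newToks, if collecting && !buf.isEmpty then aliases ++ [PySem.Str.join " " buf] else aliases)
  | t :: ts, collecting, buf, newToks, aliases =>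
    if collecting && is_all_caps_word t then
      loopB ts collecting (buf ++ [t]) newToks aliases
    else
      let aliases' := if collecting && !buf.isEmpty then aliases ++ [PySem.Str.join " " buf] else aliases
      if PySem.Set.contains ALIAS_MARKERS (PySem.Str.lower t) then
        loopB ts true [] newToks aliases'
      else
        loopB ts false buf (newToks ++ [t]) aliases'

def outerB : List String → List String → List String → List String × List String
  | [], cleaned, aliases => (cleaned, aliases)
  | c :: cs, cleaned, aliases =>
    let p := loopB (PySem.Str.split₀ c) false [] [] aliases
    outerB cs (cleaned ++ [PySem.Str.strip (PySem.Str.join " " p.1)]) p.2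

def strip_aliases_from_chunks_alt (chunks : List String) : List String × List String :=
  outerB chunks [] []

-- ===== PRECONDITION & SPEC =====
def Spec_strip_aliases_from_chunks (chunks : List String) (out : List String × List String) : Prop := out = strip_aliases_from_chunks_alt chunks
instance (chunks : List String) (out : List String × List String) : Decidable (Spec_strip_aliases_from_chunks chunks out) := by unfold Spec_strip_aliases_from_chunks; infer_instance

-- ===== CLAIM (what is proved, stated in full; the proofs are below) =====
def Claim_equal_strip_aliases_from_chunks : Prop := ∀ (chunks : List String), Dom_strip_aliases_from_chunks chunks → Spec_strip_aliases_from_chunks chunks (strip_aliases_from_chunks chunks)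

-- ===== LEMMAS AND PROOFS =====

-- core invariant: B's state machine tracks A's two loops
theorem loopB_loopA (ts : List String) : ∀ (buf newToks aliases : List String),
    (loopB ts false buf newToks aliases = loopA ts newToks aliases) ∧
    (loopB ts true buf newToks aliases =
      loopA (collectA ts).2 newToks
        (if buf ++ (collectA ts).1 ≠ [] then aliases ++ [PySem.Str.join " " (buf ++ (collectA ts).1)] else aliases)) := by
  induction ts with
  | nil =>
    intro buf newToks aliases
    constructor
    · simp [loopB, loopA]
    · simp [loopB, loopA, collectA, List.isEmpty_iff]
  | cons t ts ih =>
    intro buf newToks aliases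
    constructor
    · -- collecting = false
      by_cases hm : PySem.Set.contains ALIAS_MARKERS (PySem.Str.lower t) = true
      · simp only [loopB, loopA, hm, Bool.false_and, Bool.false_eq_true, if_false, if_true]
        rw [(ih [] newToks aliases).2]
        simp
      · simp only [loopB, loopA, hm, Bool.false_and, Bool.false_eq_true, if_false]
        exact (ih buf (newToks ++ [t]) aliases).1
    · -- collecting = true
      by_cases hc : is_all_caps_word t = true
      · simp only [loopB, collectA, hc, Bool.true_and, if_true]
        rw [(ih (buf ++ [t]) newToks aliases).2]
        simp [List.append_assoc]
      · have hcoll : collectA (t :: ts) = ([], t :: ts) := by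
          simp [collectA, hc]
        simp only [loopB, hc, Bool.true_and, hcoll]
        by_cases hm : PySem.Set.contains ALIAS_MARKERS (PySem.Str.lower t) = true
        · simp only [hm, if_true, loopA]
          rw [(ih [] newToks _).2]
          simp
        · simp only [hm, loopA]
          rw [(ih buf (newToks ++ [t]) _).1]
          simp

theorem outerB_outerA (cs : List String) : ∀ (cleaned aliases : List String),
    outerB cs cleaned aliases = outerA cs cleaned aliases := by
  induction cs with
  | nil => intro cleaned aliases; rfl
  | cons c cs ih =>
    intro cleaned aliases
    simp only [outerB, outerA, (loopB_loopA (PySem.Str.split₀ c) [] [] aliases).1]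
    exact ih _ _

-- ===== VERDICT (by name: the statement is the Claim_ definition above) =====
theorem strip_aliases_from_chunks_spec : Claim_equal_strip_aliases_from_chunks := by
  intro chunks _
  unfold Spec_strip_aliases_from_chunks strip_aliases_from_chunks strip_aliases_from_chunks_alt
  exact (outerB_outerA chunks [] []).symm
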